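-- pv_equiv track=rewrite | github.com/lifeopt/SchedulingProblem | utility.py | calculate_tardiness
-- ===== SOURCE A (Python) =====
-- def calculate_tardiness(job_schedule_matrix, due_dates, processing_times):
--     num_machines = len(job_schedule_matrix)
--     num_time_indexes = len(job_schedule_matrix[0])
--
--     completion_times = [0] * num_machines
--     tardiness = [0] * num_machines
--
--     for machine_idx in range(num_machines):
--         current_time = 0
--
--         for time_idx in range(num_time_indexes):
--             job_idx = job_schedule_matrix[machine_idx][time_idx]
--
--             if job_idx != -1:  # If a job is scheduled at this time index
--                 processing_time = processing_times[job_idx]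
--                 completion_time = current_time + processing_time
--                 completion_times[machine_idx] = completion_time
--
--                 tardiness[machine_idx] += max(0, completion_time - due_dates[job_idx])
--
--                 current_time = completion_time
--
--     return tardiness
-- ===== SOURCE B (Python) =====
-- def calculate_tardiness(job_schedule_matrix, due_dates, processing_times):
--     # The schedule has len(job_schedule_matrix[0]) time slots.
--     width = len(job_schedule_matrix[0])
--
--     def row_tardiness(row):
--         jobs = [j for j in row[:width] if j != -1]
--         # k-th job's completion time is recomputed independently as the sum of
--         # the processing times of the first k+1 scheduled jobs (no running clock).
--         return sum(
--             max(0, sum(processing_times[k] for k in jobs[:i + 1]) - due_dates[j])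
--             for i, j in enumerate(jobs)
--         )
--
--     return [row_tardiness(row) for row in job_schedule_matrix]
-- ===== Notes on version B (the rewrite author's own statement) =====
-- stated objective: alternative
-- what changed: Drops A's threaded current_time clock and mutable completion_times/tardiness arrays: each scheduled job's completion time is recomputed independently as the sum of the processing times of all jobs scheduled before it on that machine (a quadratic nested-sum formulation), and the per-machine result is a direct sum over enumerate of the filtered job list.
import Mathlib
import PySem

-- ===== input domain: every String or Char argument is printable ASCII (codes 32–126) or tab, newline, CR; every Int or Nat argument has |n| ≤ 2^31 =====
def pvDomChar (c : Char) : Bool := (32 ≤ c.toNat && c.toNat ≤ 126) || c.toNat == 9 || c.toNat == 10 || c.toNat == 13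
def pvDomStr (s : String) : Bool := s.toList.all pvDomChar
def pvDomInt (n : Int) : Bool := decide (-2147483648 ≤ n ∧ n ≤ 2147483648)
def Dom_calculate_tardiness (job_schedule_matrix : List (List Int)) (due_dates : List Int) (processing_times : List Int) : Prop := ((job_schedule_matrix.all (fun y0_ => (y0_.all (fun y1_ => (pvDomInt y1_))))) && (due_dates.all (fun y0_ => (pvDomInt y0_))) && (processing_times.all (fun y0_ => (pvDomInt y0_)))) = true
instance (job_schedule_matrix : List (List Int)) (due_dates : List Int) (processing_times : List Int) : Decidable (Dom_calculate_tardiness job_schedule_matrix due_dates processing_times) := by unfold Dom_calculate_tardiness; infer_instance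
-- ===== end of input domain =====

-- B drops A's threaded current_time clock and mutable arrays: each job's completion time is
-- recomputed independently as the sum of the processing times of the jobs scheduled before it
-- (a quadratic nested-sum formulation, objective: alternative, not faster).

-- ===== PORT A =====
-- literal transliteration of A: two index loops, mutable completion_times/tardiness arrays,
-- a threaded current_time; list indexing is PySem.List.pyGetD (in range under Pre_).
def calculate_tardiness (job_schedule_matrix : List (List Int)) (due_dates : List Int) (processing_times : List Int) : List Int :=
  let num_machines : Int := job_schedule_matrix.length
  let num_time_indexes : Int := (PySem.List.pyGetD job_schedule_matrix 0 []).length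
  let completion_times : List Int := List.replicate job_schedule_matrix.length 0
  let tardiness : List Int := List.replicate job_schedule_matrix.length 0
  let final := (PySem.List.pyRange 0 num_machines 1).foldl
    (fun (st : List Int × List Int) mi =>
      let inner := (PySem.List.pyRange 0 num_time_indexes 1).foldl
        (fun (s : Int × List Int × List Int) ti =>
          let j := PySem.List.pyGetD (PySem.List.pyGetD job_schedule_matrix mi []) ti 0
          if j ≠ -1 then
            let p := PySem.List.pyGetD processing_times j 0
            let c := s.1 + p
            let ct2 := s.2.1.set mi.toNat c
            let t2 := s.2.2.set mi.toNat
              (PySem.List.pyGetD s.2.2 mi 0 + max 0 (c - PySem.List.pyGetD due_dates j 0))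
            (c, ct2, t2)
          else s)
        ((0 : Int), st.1, st.2)
      (inner.2.1, inner.2.2))
    (completion_times, tardiness)
  final.2

-- ===== PORT B =====
-- Source B's row_tardiness helper: filter the row, then for each (i, j) in enumerate(jobs) recompute
-- the completion time from scratch as the sum over jobs[:i+1] of processing_times
def pv_row_tardiness (due_dates processing_times : List Int) (width : Int) (row : List Int) : Int :=
  let jobs := (PySem.List.slice row none (some width)).filter (fun j => j != -1)
  ((PySem.List.enumerate jobs).map (fun ij =>
    max 0 (((PySem.List.slice jobs none (some (ij.1 + 1))).map
              (fun k => PySem.List.pyGetD processing_times k 0)).sum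
            - PySem.List.pyGetD due_dates ij.2 0))).sum

def calculate_tardiness_alt (job_schedule_matrix : List (List Int)) (due_dates : List Int) (processing_times : List Int) : List Int :=
  let width : Int := (PySem.List.pyGetD job_schedule_matrix 0 []).length
  job_schedule_matrix.map (pv_row_tardiness due_dates processing_times width)

-- ===== PRECONDITION & SPEC =====
-- Pre_ holds exactly where the Python A returns: a nonempty matrix (A reads matrix[0]),
-- every row at least as long as row 0 (A indexes each row at 0..len(row0)-1), and every
-- scheduled job index read by A a valid Python index into both due_dates and processing_times.
def Pre_calculate_tardiness (job_schedule_matrix : List (List Int)) (due_dates : List Int) (processing_times : List Int) : Prop :=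
  job_schedule_matrix ≠ [] ∧
  ∀ row ∈ job_schedule_matrix,
    (PySem.List.pyGetD job_schedule_matrix 0 []).length ≤ row.length ∧
    ∀ j ∈ row.take (PySem.List.pyGetD job_schedule_matrix 0 []).length, j ≠ -1 →
      PySem.Raise.InRange processing_times.length j ∧ PySem.Raise.InRange due_dates.length j

instance (job_schedule_matrix : List (List Int)) (due_dates : List Int) (processing_times : List Int) : Decidable (Pre_calculate_tardiness job_schedule_matrix due_dates processing_times) := by unfold Pre_calculate_tardiness; infer_instance

def pvWitness_calculate_tardiness : List (List Int) × List Int × List Int :=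
  ([[0, -1], [1, 0]], [2, 3], [2, 2])

def Spec_calculate_tardiness (job_schedule_matrix : List (List Int)) (due_dates : List Int) (processing_times : List Int) (out : List Int) : Prop := out = calculate_tardiness_alt job_schedule_matrix due_dates processing_times
instance (job_schedule_matrix : List (List Int)) (due_dates : List Int) (processing_times : List Int) (out : List Int) : Decidable (Spec_calculate_tardiness job_schedule_matrix due_dates processing_times out) := by unfold Spec_calculate_tardiness; infer_instance

-- ===== CLAIM (what is proved, stated in full; the proofs are below) =====
def Claim_equal_calculate_tardiness : Prop := ∀ (job_schedule_matrix : List (List Int)) (due_dates : List Int) (processing_times : List Int), Dom_calculate_tardiness job_schedule_matrix due_dates processing_times → Pre_calculate_tardiness job_schedule_matrix due_dates processing_times → Spec_calculate_tardiness job_schedule_matrix due_dates processing_times (calculate_tardiness job_schedule_matrix due_dates processing_times)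

-- ===== LEMMAS AND PROOFS =====

-- the tardiness A's inner loop accumulates over one row, threaded completion time c
def pvT (due_dates processing_times : List Int) : List Int → Int → Int
  | [], _ => 0
  | j :: rest, c =>
    if j = -1 then pvT due_dates processing_times rest c
    else
      max 0 (c + PySem.List.pyGetD processing_times j 0 - PySem.List.pyGetD due_dates j 0)
        + pvT due_dates processing_times rest (c + PySem.List.pyGetD processing_times j 0)

theorem pvT_filter (dd pt : List Int) (l : List Int) (c : Int) :
    pvT dd pt l c = pvT dd pt (l.filter (fun j => j != -1)) c := by
  induction l generalizing c with
  | nil => rfl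
  | cons j rest ih =>
    by_cases hj : j = -1 <;> simp [pvT, hj, ih]

-- shifting the start of enumerate = shifting every index
theorem pv_enum_shift {α : Type} (xs : List α) (s : Int) :
    PySem.List.enumerate xs (s + 1) = (PySem.List.enumerate xs s).map (fun p => (p.1 + 1, p.2)) := by
  induction xs generalizing s with
  | nil => simp [PySem.List.enumerate_nil]
  | cons x rest ih =>
    rw [PySem.List.enumerate_cons, PySem.List.enumerate_cons, List.map_cons]
    rw [show s + 1 + 1 = (s + 1) + 1 from rfl, ih (s + 1)]

-- B's nested-sum over enumerate (take form) equals A's threaded pvT, for rows of non-(-1) jobs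
theorem pv_enum_sum_eq_pvT (dd pt : List Int) (jobs : List Int) (c : Int)
    (h : ∀ j ∈ jobs, j ≠ -1) :
    ((PySem.List.enumerate jobs).map (fun ij =>
      max 0 (c + ((jobs.take (ij.1 + 1).toNat).map (fun k => PySem.List.pyGetD pt k 0)).sum
              - PySem.List.pyGetD dd ij.2 0))).sum = pvT dd pt jobs c := by
  induction jobs generalizing c with
  | nil => rfl
  | cons j rest ih =>
    have hj : j ≠ -1 := h j (by simp)
    rw [PySem.List.enumerate_cons, List.map_cons, List.sum_cons]
    rw [show (0 : Int) + 1 = 0 + 1 from rfl, pv_enum_shift rest 0, List.map_map]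
    have hcong : (PySem.List.enumerate rest).map
        ((fun ij => max 0 (c + (((j :: rest).take (ij.1 + 1).toNat).map (fun k => PySem.List.pyGetD pt k 0)).sum - PySem.List.pyGetD dd ij.2 0))
          ∘ (fun p => (p.1 + 1, p.2)))
        = (PySem.List.enumerate rest).map (fun ij =>
            max 0 ((c + PySem.List.pyGetD pt j 0)
              + ((rest.take (ij.1 + 1).toNat).map (fun k => PySem.List.pyGetD pt k 0)).sum
              - PySem.List.pyGetD dd ij.2 0)) := by
      apply List.map_congr_left
      intro p hp
      obtain ⟨k, hk, rfl⟩ := (PySem.List.mem_enumerate_iff _ _ _).mp hp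
      simp only [Function.comp]
      have h1 : ((0 : Int) + k + 1 + 1).toNat = k + 2 := by omega
      have h2 : ((0 : Int) + k + 1).toNat = k + 1 := by omega
      rw [h1, h2, List.take_succ_cons, List.map_cons, List.sum_cons]
      ring_nf
    rw [hcong, ih (c + PySem.List.pyGetD pt j 0) (fun x hx => h x (by simp [hx]))]
    simp [pvT, if_neg hj]

-- A's inner-loop body as a named step function (definitionally equal to the port's lambda)
def pvStepA (dd pt : List Int) (mi : Int) (s : Int × List Int × List Int) (j : Int) :
    Int × List Int × List Int :=
  if j ≠ -1 then
    let p := PySem.List.pyGetD pt j 0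
    let c := s.1 + p
    let ct2 := s.2.1.set mi.toNat c
    let t2 := s.2.2.set mi.toNat
      (PySem.List.pyGetD s.2.2 mi 0 + max 0 (c - PySem.List.pyGetD dd j 0))
    (c, ct2, t2)
  else s

theorem pyGetD_set_self (t : List Int) (mi : Int) (v : Int) (hmi : 0 ≤ mi) (hlen : mi.toNat < t.length) :
    PySem.List.pyGetD (t.set mi.toNat v) mi 0 = v := by
  rw [PySem.List.pyGetD_eq_getElem _ _ hmi (by simpa using (show mi < (t.length : Int) by omega))]
  simp [List.getElem_set_self (by simpa using hlen)]

-- INNER loop: folding A's body over a job list sets tardiness[mi] to its old value + pvT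
theorem inner_fold (dd pt : List Int) (mi : Int) (hmi : 0 ≤ mi)
    (l : List Int) (c : Int) (ct t : List Int) (hlen : mi.toNat < t.length) :
    ∃ c' ct',
      l.foldl (pvStepA dd pt mi) (c, ct, t)
      = (c', ct', t.set mi.toNat (PySem.List.pyGetD t mi 0 + pvT dd pt l c)) := by
  induction l generalizing c ct t with
  | nil =>
    refine ⟨c, ct, ?_⟩
    have : PySem.List.pyGetD t mi 0 = t[mi.toNat] :=
      PySem.List.pyGetD_eq_getElem _ _ hmi (by omega)
    simp [pvT, this, List.set_getElem_self hlen]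
  | cons j rest ih =>
    rw [List.foldl_cons]
    by_cases hj : j = -1
    · rw [show pvStepA dd pt mi (c, ct, t) j = (c, ct, t) from by simp [pvStepA, hj]]
      simpa [pvT, hj] using ih c ct t hlen
    · rw [show pvStepA dd pt mi (c, ct, t) j
          = (c + PySem.List.pyGetD pt j 0,
             ct.set mi.toNat (c + PySem.List.pyGetD pt j 0),
             t.set mi.toNat (PySem.List.pyGetD t mi 0
               + max 0 (c + PySem.List.pyGetD pt j 0 - PySem.List.pyGetD dd j 0)))
         from by simp [pvStepA, hj]]
      obtain ⟨c', ct', heq⟩ := ih (c + PySem.List.pyGetD pt j 0)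
        (ct.set mi.toNat (c + PySem.List.pyGetD pt j 0))
        (t.set mi.toNat (PySem.List.pyGetD t mi 0
          + max 0 (c + PySem.List.pyGetD pt j 0 - PySem.List.pyGetD dd j 0)))
        (by simpa using hlen)
      refine ⟨c', ct', ?_⟩
      rw [heq, pyGetD_set_self _ _ _ hmi hlen, List.set_set]
      simp only [pvT, if_neg hj]
      ring_nf

-- A's outer-loop body as a named step function (definitionally equal to the port's lambda)
def pvOuterA (m : List (List Int)) (dd pt : List Int) (st : List Int × List Int) (mi : Int) :
    List Int × List Int :=
  let inner := (PySem.List.pyRange 0 ((PySem.List.pyGetD m 0 []).length : Int) 1).foldl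
    (fun s ti => pvStepA dd pt mi s (PySem.List.pyGetD (PySem.List.pyGetD m mi []) ti 0))
    ((0 : Int), st.1, st.2)
  (inner.2.1, inner.2.2)

-- one step of A's outer loop: machine k's row, starting from zero tardiness at slot k
theorem outer_step (m : List (List Int)) (dd pt : List Int) (k : Nat) (hk : k < m.length)
    (hrow : (PySem.List.pyGetD m 0 []).length ≤ (m[k]).length)
    (ct t : List Int) (hlen : t.length = m.length) (ht : t.getD k 0 = 0) :
    ∃ ct', pvOuterA m dd pt (ct, t) (k : Int)
      = (ct', t.set k (pvT dd pt ((m[k]).take (PySem.List.pyGetD m 0 []).length) 0)) := by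
  unfold pvOuterA
  have hrowk : PySem.List.pyGetD m (k : Int) [] = m[k] := by
    rw [PySem.List.pyGetD_natCast, List.getD_eq_getElem _ _ hk]
  rw [hrowk]
  set w : Nat := (PySem.List.pyGetD m 0 []).length with hw
  have hcong : ((PySem.List.pyRange 0 (w : Int) 1).foldl
      (fun s ti => pvStepA dd pt (k : Int) s (PySem.List.pyGetD (m[k]) ti 0)) ((0:Int), ct, t))
      = ((PySem.List.pyRange 0 (w : Int) 1).foldl
      (fun s ti => pvStepA dd pt (k : Int) s (PySem.List.pyGetD ((m[k]).take w) ti 0)) ((0:Int), ct, t)) := by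
    apply PySem.List.foldl_congr_mem
    intro acc ti hti
    obtain ⟨h0, h1⟩ := PySem.List.mem_pyRange_one.mp hti
    congr 1
    rw [PySem.List.pyGetD_eq_getElem _ _ h0 (by omega),
        PySem.List.pyGetD_eq_getElem _ _ h0 (by simp [List.length_take]; omega)]
    exact (List.getElem_take).symm
  rw [hcong]
  rw [show ((w : Nat) : Int) = PySem.List.len ((m[k]).take w) from by
    simp [PySem.List.len, List.length_take]; omega]
  rw [PySem.List.foldl_pyRange_pyGetD _ _ _ _ (le_refl 0)]
  simp only [Int.toNat_zero, List.drop_zero]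
  obtain ⟨c', ct', heq⟩ := inner_fold dd pt (k : Int) (by omega) ((m[k]).take w) 0 ct t (by omega)
  refine ⟨ct', ?_⟩
  rw [heq]
  have ht' : t[k]?.getD 0 = 0 := by rw [← List.getD_eq_getElem?_getD]; exact ht
  simp [PySem.List.pyGetD_natCast, ht']

-- take (k+1) of a list set at k : the prefix plus the written value
theorem pv_take_set (l : List Int) (i : Nat) (v : Int) (h : i < l.length) :
    (l.set i v).take (i + 1) = l.take i ++ [v] := by
  rw [List.set_eq_take_append_cons_drop, if_pos h]
  rw [show i + 1 = (List.take i l).length + 1 by simp; omega]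
  rw [List.take_append]
  simp

-- A's whole outer loop, from machine k on, writes each row's pvT into its tardiness slot
theorem outer_fold (m : List (List Int)) (dd pt : List Int)
    (hrows : ∀ row ∈ m, (PySem.List.pyGetD m 0 []).length ≤ row.length) :
    ∀ (n k : Nat) (ct t : List Int), m.length - k = n → k ≤ m.length → t.length = m.length →
    (∀ i : Nat, k ≤ i → t.getD i 0 = 0) →
    ((PySem.List.pyRange (k : Int) (m.length : Int) 1).foldl (pvOuterA m dd pt) (ct, t)).2
      = t.take k ++ (m.drop k).map
          (fun row => pvT dd pt (row.take (PySem.List.pyGetD m 0 []).length) 0) := by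
  intro n
  induction n with
  | zero =>
    intro k ct t hn hk hlen _ht
    have hkeq : k = m.length := by omega
    subst hkeq
    rw [PySem.List.pyRange_one_eq_nil (by omega)]
    rw [List.drop_of_length_le (by omega), List.map_nil, List.append_nil,
      List.take_of_length_le (by omega), List.foldl_nil]
  | succ n ih =>
    intro k ct t hn hk hlen ht
    have hklt : k < m.length := by omega
    rw [PySem.List.pyRange_one_cons (by exact_mod_cast hklt), List.foldl_cons]
    obtain ⟨ct', hstep⟩ := outer_step m dd pt k hklt
      (hrows _ (List.getElem_mem hklt)) ct t hlen (ht k (le_refl k))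
    rw [hstep]
    have hcast : ((k : Int) + 1) = ((k + 1 : Nat) : Int) := by push_cast; ring
    rw [hcast]
    rw [ih (k + 1) ct' (t.set k (pvT dd pt ((m[k]).take (PySem.List.pyGetD m 0 []).length) 0))
      (by omega) (by omega) (by simpa using hlen)
      (by
        intro i hi
        rw [List.getD_eq_getElem?_getD, List.getElem?_set_ne (by omega), ← List.getD_eq_getElem?_getD]
        exact ht i (by omega))]
    rw [pv_take_set t k _ (by omega)]
    rw [List.drop_eq_getElem_cons hklt, List.map_cons]
    simp

-- B's slice inside the sum is a take (enumerate indices are ≥ 0)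
theorem pv_enum_slice_eq (dd pt : List Int) (jobs : List Int) (h : ∀ j ∈ jobs, j ≠ -1) :
    ((PySem.List.enumerate jobs).map (fun ij =>
      max 0 (((PySem.List.slice jobs none (some (ij.1 + 1))).map
                (fun k => PySem.List.pyGetD pt k 0)).sum - PySem.List.pyGetD dd ij.2 0))).sum
      = pvT dd pt jobs 0 := by
  have hcong : (PySem.List.enumerate jobs).map (fun ij =>
      max 0 (((PySem.List.slice jobs none (some (ij.1 + 1))).map
                (fun k => PySem.List.pyGetD pt k 0)).sum - PySem.List.pyGetD dd ij.2 0))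
      = (PySem.List.enumerate jobs).map (fun ij =>
          max 0 ((0 : Int) + ((jobs.take (ij.1 + 1).toNat).map (fun k => PySem.List.pyGetD pt k 0)).sum
            - PySem.List.pyGetD dd ij.2 0)) := by
    apply List.map_congr_left
    intro p hp
    obtain ⟨k, hk, rfl⟩ := (PySem.List.mem_enumerate_iff _ _ _).mp hp
    have hb : (0 : Int) + (k : Int) + 1 = ((k + 1 : Nat) : Int) := by push_cast; ring
    simp only [hb, PySem.List.slice_to_natCast, Int.toNat_natCast]
    ring_nf
  rw [hcong]
  exact pv_enum_sum_eq_pvT dd pt jobs 0 h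

-- per row, B's filter → enumerate → nested-sum pipeline equals A's threaded pvT
theorem rowB_eq_pvT (m : List (List Int)) (dd pt : List Int) (row : List Int) :
    pv_row_tardiness dd pt ((PySem.List.pyGetD m 0 []).length : Int) row
      = pvT dd pt (row.take (PySem.List.pyGetD m 0 []).length) 0 := by
  simp only [pv_row_tardiness, PySem.List.slice_to_natCast]
  rw [pvT_filter]
  exact pv_enum_slice_eq dd pt _ (by
    intro j hj
    have := List.of_mem_filter hj
    simpa using this)

theorem calculate_tardiness_spec : Claim_equal_calculate_tardiness := by
  intro m dd pt _hdom hpre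
  unfold Spec_calculate_tardiness
  have hA : calculate_tardiness m dd pt
      = ((PySem.List.pyRange 0 (m.length : Int) 1).foldl (pvOuterA m dd pt)
          (List.replicate m.length 0, List.replicate m.length 0)).2 := rfl
  rw [hA]
  have hB : calculate_tardiness_alt m dd pt
      = m.map (pv_row_tardiness dd pt ((PySem.List.pyGetD m 0 []).length : Int)) := rfl
  rw [hB]
  have hout := outer_fold m dd pt (fun row hr => (hpre.2 row hr).1) m.length 0
    (List.replicate m.length 0) (List.replicate m.length 0) rfl
    (Nat.zero_le _) (by simp) (by intro i _; simp [List.getD_eq_getElem?_getD, List.getElem?_replicate]; split <;> simp)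
  simp only [Nat.cast_zero] at hout
  rw [hout]
  simp only [List.take_zero, List.drop_zero, List.nil_append]
  apply List.map_congr_left
  intro row hr
  exact (rowB_eq_pvT m dd pt row).symm
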